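-- pv_equiv track=rewrite | github.com/KYUSEONGHAN/Development | 하루에 한개씩 문제 풀기/Python/BOJ/그리디/11508.py | two_plus_one
-- ===== SOURCE A (Python) =====
-- def two_plus_one(l):
--     result = 0
--     chunk = [l[i:i + 3] for i in range(0, len(l), 3)]
--
--     for i in chunk:
--         if len(i) != 1:
--             result += i[0] + i[1]
--         else:
--             result += i[0]
--
--     return result
-- ===== SOURCE B (Python) =====
-- def two_plus_one(l):
--     # single pass: every third element (index % 3 == 2) is free
--     total = 0
--     for i, x in enumerate(l):
--         if i % 3 != 2:
--             total += x
--     return total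
-- ===== Notes on version B (the rewrite author's own statement) =====
-- stated objective: simpler
-- what changed: Replaced the intermediate chunks-of-three list and the len()-based branch by a single enumerate pass that adds l[i] exactly when i % 3 != 2.
import Mathlib
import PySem

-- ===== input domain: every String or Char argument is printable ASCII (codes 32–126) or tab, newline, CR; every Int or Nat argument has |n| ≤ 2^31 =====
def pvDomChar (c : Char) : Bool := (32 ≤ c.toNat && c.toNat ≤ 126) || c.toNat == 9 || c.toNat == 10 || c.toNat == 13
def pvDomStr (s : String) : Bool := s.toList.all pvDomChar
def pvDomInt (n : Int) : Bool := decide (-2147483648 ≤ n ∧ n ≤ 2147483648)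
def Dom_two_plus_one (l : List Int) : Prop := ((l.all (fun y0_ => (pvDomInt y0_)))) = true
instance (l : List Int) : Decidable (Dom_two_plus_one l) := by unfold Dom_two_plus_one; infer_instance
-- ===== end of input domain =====

-- B replaces A's chunks-of-three list and its len()-based branch by a single
-- enumerate pass adding l[i] exactly when i % 3 ≠ 2 (objective: simpler).


-- ===== PORT A =====
-- chunks are always nonempty, so the pyGetD default 0 is never used
def two_plus_one (l : List Int) : Int :=
  let chunk := (PySem.List.pyRange 0 (l.length : Int) 3).map
      (fun i => PySem.List.slice l (some i) (some (i + 3)))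
  chunk.foldl
    (fun result i =>
      if i.length ≠ 1 then
        result + PySem.List.pyGetD i 0 0 + PySem.List.pyGetD i 1 0
      else
        result + PySem.List.pyGetD i 0 0) 0

-- ===== PORT B =====
def two_plus_one_alt (l : List Int) : Int :=
  (PySem.List.enumerate l 0).foldl
    (fun total p => if p.1 % 3 ≠ 2 then total + p.2 else total) 0

-- ===== PRECONDITION & SPEC =====
def Spec_two_plus_one (l : List Int) (out : Int) : Prop := out = two_plus_one_alt l
instance (l : List Int) (out : Int) : Decidable (Spec_two_plus_one l out) := by unfold Spec_two_plus_one; infer_instance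

-- ===== CLAIM (what is proved, stated in full; the proofs are below) =====
def Claim_equal_two_plus_one : Prop := ∀ (l : List Int), Dom_two_plus_one l → Spec_two_plus_one l (two_plus_one l)

-- ===== LEMMAS AND PROOFS =====

-- proof-only helper: chunks of three, structurally
def chunks3 (l : List Int) : List (List Int) :=
  match l with
  | [] => []
  | a :: t => (a :: t.take 2) :: chunks3 (t.drop 2)
termination_by l.length
decreasing_by simp

-- each slice taken by A is a drop/take window of three
lemma slice3 (L : List Int) (k : Nat) :
    PySem.List.slice L (some (0 + 3 * (k : Int))) (some (0 + 3 * (k : Int) + 3))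
      = (L.drop (3 * k)).take 3 := by
  rw [PySem.List.slice_toNat L (by positivity) (by positivity)]
  have ha : ((0:Int) + 3 * (k : Int)).toNat = 3 * k := by omega
  have hb : ((0:Int) + 3 * (k : Int) + 3).toNat = 3 * k + 3 := by omega
  rw [ha, hb]
  congr 1
  omega

-- A's range/slice comprehension in drop/take form
lemma pymap_eq (L : List Int) :
    (PySem.List.pyRange 0 (L.length : Int) 3).map
      (fun i => PySem.List.slice L (some i) (some (i + 3)))
    = (List.range ((L.length + 2) / 3)).map (fun k => (L.drop (3 * k)).take 3) := by
  rw [PySem.List.pyRange_of_pos 0 (L.length : Int) (by norm_num), List.map_map]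
  have hcnt : (if (0:Int) < (L.length : Int)
      then (((L.length : Int) - 0 + 3 - 1) / 3).toNat else 0) = (L.length + 2) / 3 := by
    split_ifs with h <;> omega
  rw [hcnt]
  exact List.map_congr_left (fun k _ => slice3 L k)

-- the drop/take windows are the structural chunking
lemma chunkmap' : ∀ (n : Nat) (l : List Int), l.length ≤ n →
    (List.range ((l.length + 2) / 3)).map (fun k => (l.drop (3 * k)).take 3)
      = chunks3 l := by
  intro n
  induction n with
  | zero =>
    intro l hl
    have : l = [] := List.eq_nil_of_length_eq_zero (Nat.le_zero.mp hl)
    subst this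
    simp [chunks3]
  | succ n ih =>
    intro l hl
    match l with
    | [] => simp [chunks3]
    | a :: t =>
      have hm : ((a :: t).length + 2) / 3 = t.length / 3 + 1 := by
        simp only [List.length_cons]; omega
      rw [hm, List.range_succ_eq_map, List.map_cons, List.map_map]
      have hhead : (((a :: t).drop (3 * 0)).take 3) = a :: t.take 2 := by
        simp
      rw [hhead]
      have htail : (List.range (t.length / 3)).map
          ((fun k => ((a :: t).drop (3 * k)).take 3) ∘ Nat.succ)
          = (List.range (((t.drop 2).length + 2) / 3)).map
              (fun k => ((t.drop 2).drop (3 * k)).take 3) := by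
        have hc : t.length / 3 = ((t.drop 2).length + 2) / 3 := by
          simp only [List.length_drop]; omega
        rw [hc]
        refine List.map_congr_left (fun k _ => ?_)
        simp only [Function.comp_apply]
        have h1 : 3 * Nat.succ k = 1 + (2 + 3 * k) := by omega
        rw [h1, ← List.drop_drop, ← List.drop_drop]
        rfl
      rw [htail, ih (t.drop 2) (by simp at hl ⊢; omega)]
      simp [chunks3]

-- A's comprehension equals the structural chunking
lemma chunkmap (l : List Int) :
    (PySem.List.pyRange 0 (l.length : Int) 3).map
      (fun i => PySem.List.slice l (some i) (some (i + 3))) = chunks3 l := by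
  rw [pymap_eq]
  exact chunkmap' l.length l le_rfl

-- A's loop body, accumulator factored out
lemma foldA (cs : List (List Int)) (r : Int) :
    cs.foldl
      (fun result i =>
        if i.length ≠ 1 then
          result + PySem.List.pyGetD i 0 0 + PySem.List.pyGetD i 1 0
        else
          result + PySem.List.pyGetD i 0 0) r
    = r + cs.foldl
      (fun result i =>
        if i.length ≠ 1 then
          result + PySem.List.pyGetD i 0 0 + PySem.List.pyGetD i 1 0
        else
          result + PySem.List.pyGetD i 0 0) 0 := by
  induction cs generalizing r with
  | nil => simp
  | cons c cs ih =>
    simp only [List.foldl_cons]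
    rw [ih, ih (if c.length ≠ 1 then 0 + PySem.List.pyGetD c 0 0 + PySem.List.pyGetD c 1 0 else 0 + PySem.List.pyGetD c 0 0)]
    split <;> ring

-- B's loop: accumulator factored out
lemma foldB (t : List Int) : ∀ (s r : Int),
    (PySem.List.enumerate t s).foldl
      (fun total p => if p.1 % 3 ≠ 2 then total + p.2 else total) r
    = r + (PySem.List.enumerate t s).foldl
      (fun total p => if p.1 % 3 ≠ 2 then total + p.2 else total) 0 := by
  induction t with
  | nil => simp [PySem.List.enumerate]
  | cons x t ih =>
    intro s r
    simp only [PySem.List.enumerate_cons, List.foldl_cons]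
    rw [ih, ih (s+1) (if s % 3 ≠ 2 then 0 + x else 0)]
    split <;> ring

-- B's loop: shifting the enumerate start by 3 does not change the result
lemma foldB_shift (t : List Int) : ∀ (s : Int),
    (PySem.List.enumerate t (s + 3)).foldl
      (fun total p => if p.1 % 3 ≠ 2 then total + p.2 else total) 0
    = (PySem.List.enumerate t s).foldl
      (fun total p => if p.1 % 3 ≠ 2 then total + p.2 else total) 0 := by
  induction t with
  | nil => simp [PySem.List.enumerate]
  | cons x t ih =>
    intro s
    simp only [PySem.List.enumerate_cons, List.foldl_cons]
    have h3 : (s + 3) % 3 = s % 3 := by omega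
    rw [h3, foldB, foldB t (s+1)]
    have : s + 3 + 1 = (s + 1) + 3 := by ring
    rw [this, ih]

lemma main3 : ∀ (n : Nat) (l : List Int), l.length ≤ n →
    (chunks3 l).foldl
      (fun result i =>
        if i.length ≠ 1 then
          result + PySem.List.pyGetD i 0 0 + PySem.List.pyGetD i 1 0
        else
          result + PySem.List.pyGetD i 0 0) 0 = two_plus_one_alt l := by
  intro n
  induction n with
  | zero =>
    intro l hl
    have : l = [] := List.eq_nil_of_length_eq_zero (Nat.le_zero.mp hl)
    subst this
    simp [chunks3, two_plus_one_alt, PySem.List.enumerate]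
  | succ n ih =>
    intro l hl
    match l with
    | [] => simp [chunks3, two_plus_one_alt, PySem.List.enumerate]
    | [a] =>
      simp [chunks3, two_plus_one_alt, PySem.List.enumerate, PySem.List.pyGetD]
    | [a, b] =>
      simp [chunks3, two_plus_one_alt, PySem.List.enumerate, PySem.List.pyGetD]
    | a :: b :: c :: t =>
      have hc : chunks3 (a :: b :: c :: t) = [a, b, c] :: chunks3 t := by
        simp [chunks3]
      rw [hc]
      simp only [List.foldl_cons]
      rw [if_pos (by simp : ([a,b,c] : List Int).length ≠ 1)]
      have hget0 : PySem.List.pyGetD ([a,b,c] : List Int) 0 0 = a := by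
        simp [PySem.List.pyGetD]
      have hget1 : PySem.List.pyGetD ([a,b,c] : List Int) 1 0 = b := by
        simp [PySem.List.pyGetD]
      rw [hget0, hget1, foldA]
      have ht : t.length ≤ n := by simp at hl; omega
      rw [ih t ht]
      unfold two_plus_one_alt
      simp only [PySem.List.enumerate_cons, List.foldl_cons]
      rw [if_pos (by decide : ((0:Int)) % 3 ≠ 2), if_pos (by decide : ((0:Int)+1) % 3 ≠ 2),
        if_neg (by decide : ¬ ((0:Int)+1+1) % 3 ≠ 2)]
      have h03 : ((0:Int)+1+1+1) = 0 + 3 := by norm_num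
      rw [h03, foldB t (0 + 3) (0 + a + b), foldB_shift t 0]

-- ===== VERDICT (by name: the statement is the Claim_ definition above) =====
theorem two_plus_one_spec : Claim_equal_two_plus_one := by
  intro l _
  unfold Spec_two_plus_one two_plus_one
  simp only []
  rw [chunkmap l]
  exact main3 l.length l le_rfl
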